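-- pv_equiv track=rewrite | github.com/ZacharyHsu/License-Plate-Detection | CS373LicensePlateDetection.py | computeDilation8Nbh3x3FlatSE
-- ===== SOURCE A (Python) =====
-- def createInitializedGreyscalePixelArray(image_width, image_height, initValue = 0):
--
--     new_array = [[initValue for x in range(image_width)] for y in range(image_height)]
--     return new_array
--
-- def computeDilation8Nbh3x3FlatSE(pixel_array, image_width, image_height):
--     result_pixel_array = createInitializedGreyscalePixelArray(image_width, image_height)
--     indivial_pixel = 0
--     compare_x = 9
--     for y in range(image_height):
--         for x in range(image_width):
--             for i in [-1,0,1]: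
--                 for j in [-1,0,1]:
--                     if y + i < 0 or x + j < 0 or y + i >= image_height or x + j >= image_width:
--                         indivial_pixel += 0
--                     else:
--                         indivial_pixel += pixel_array[y + i][x + j]
--             if indivial_pixel > 0:
--                 result_pixel_array[y][x] = 1
--             indivial_pixel = 0
--     return result_pixel_array
-- ===== SOURCE B (Python) =====
-- def computeDilation8Nbh3x3FlatSE(pixel_array, image_width, image_height):
--     # Separable two-pass dilation: horizontal 3-wide sums first, then a
--     # vertical 3-high sum of those, thresholded > 0 (6 adds/pixel vs 9 reads).
--     hs = [[(pixel_array[y][x - 1] if x > 0 else 0)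
--            + pixel_array[y][x]
--            + (pixel_array[y][x + 1] if x + 1 < image_width else 0)
--            for x in range(image_width)]
--           for y in range(image_height)]
--     return [[1 if ((hs[y - 1][x] if y > 0 else 0)
--                    + hs[y][x]
--                    + (hs[y + 1][x] if y + 1 < image_height else 0)) > 0 else 0
--              for x in range(image_width)]
--             for y in range(image_height)]
-- ===== Notes on version B (the rewrite author's own statement) =====
-- stated objective: alternative
-- what changed: Replaces the per-pixel 3x3 gather (9 guarded reads summed per output pixel) by a separable two-pass scheme: a horizontal 3-wide sum pass, then a vertical 3-high sum of that pass thresholded > 0 (6 adds per pixel instead of 9 reads).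
import Mathlib
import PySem

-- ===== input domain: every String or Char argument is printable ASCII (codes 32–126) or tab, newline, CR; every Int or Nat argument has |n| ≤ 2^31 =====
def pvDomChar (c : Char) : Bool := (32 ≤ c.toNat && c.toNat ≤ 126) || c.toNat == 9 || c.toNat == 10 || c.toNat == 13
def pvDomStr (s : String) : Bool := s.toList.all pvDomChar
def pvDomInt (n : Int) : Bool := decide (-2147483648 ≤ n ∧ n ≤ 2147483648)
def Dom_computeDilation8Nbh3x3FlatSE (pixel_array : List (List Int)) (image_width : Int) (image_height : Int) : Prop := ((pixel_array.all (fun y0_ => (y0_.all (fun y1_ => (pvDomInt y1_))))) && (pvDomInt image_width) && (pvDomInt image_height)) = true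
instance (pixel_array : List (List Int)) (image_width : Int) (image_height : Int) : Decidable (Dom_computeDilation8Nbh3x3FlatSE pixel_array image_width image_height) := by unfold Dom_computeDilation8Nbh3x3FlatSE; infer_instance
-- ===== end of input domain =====

-- B replaces A's per-pixel 3x3 gather (9 guarded reads per output pixel) by a separable
-- two-pass scheme (horizontal 3-wide sums, then vertical 3-high sums thresholded > 0);
-- objective: alternative (fewer reads per pixel; same asymptotic cost).

-- ===== PORT A =====
-- total form of pixel_array[y][x]; every evaluation is in bounds under Pre_ (both ports
-- only read it under guards keeping 0 ≤ y < image_height, 0 ≤ x < image_width)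
def pvGet (pa : List (List Int)) (y x : Int) : Int :=
  PySem.List.pyGetD (PySem.List.pyGetD pa y []) x 0

def createInitializedGreyscalePixelArray (image_width image_height initValue : Int) : List (List Int) :=
  (PySem.List.pyRange 0 image_height 1).map (fun _ =>
    (PySem.List.pyRange 0 image_width 1).map (fun _ => initValue))

def computeDilation8Nbh3x3FlatSE (pixel_array : List (List Int)) (image_width : Int) (image_height : Int) : List (List Int) :=
  let result := createInitializedGreyscalePixelArray image_width image_height 0
  -- result[y][x] = 1 : y,x come from range(...) so are nonnegative; .toNat is exact here
  (PySem.List.pyRange 0 image_height 1).foldl (fun res y =>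
    (PySem.List.pyRange 0 image_width 1).foldl (fun res x =>
      let s : Int := [(-1 : Int), 0, 1].foldl (fun acc i =>
        [(-1 : Int), 0, 1].foldl (fun acc j =>
          if y + i < 0 ∨ x + j < 0 ∨ y + i ≥ image_height ∨ x + j ≥ image_width then
            acc + 0
          else
            acc + pvGet pixel_array (y + i) (x + j)) acc) 0
      if s > 0 then res.modify y.toNat (fun row => row.set x.toNat 1) else res) res) result

-- ===== PORT B =====
def computeDilation8Nbh3x3FlatSE_alt (pixel_array : List (List Int)) (image_width : Int) (image_height : Int) : List (List Int) :=
  let hs := (PySem.List.pyRange 0 image_height 1).map (fun y =>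
    (PySem.List.pyRange 0 image_width 1).map (fun x =>
      (if x > 0 then pvGet pixel_array y (x - 1) else 0)
      + pvGet pixel_array y x
      + (if x + 1 < image_width then pvGet pixel_array y (x + 1) else 0)))
  (PySem.List.pyRange 0 image_height 1).map (fun y =>
    (PySem.List.pyRange 0 image_width 1).map (fun x =>
      if ((if y > 0 then pvGet hs (y - 1) x else 0)
          + pvGet hs y x
          + (if y + 1 < image_height then pvGet hs (y + 1) x else 0)) > 0 then (1 : Int) else 0))

-- ===== PRECONDITION & SPEC =====
-- Pre_ excludes exactly the inputs where the Python A raises IndexError: a positive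
-- image_width together with fewer than image_height rows, or a row among the first
-- image_height rows shorter than image_width (when image_width ≤ 0 nothing is read).
def Pre_computeDilation8Nbh3x3FlatSE (pixel_array : List (List Int)) (image_width : Int) (image_height : Int) : Prop :=
  0 < image_width →
    (image_height ≤ (pixel_array.length : Int) ∧
     ∀ row ∈ pixel_array.take image_height.toNat, image_width ≤ (row.length : Int))
instance (pixel_array : List (List Int)) (image_width : Int) (image_height : Int) : Decidable (Pre_computeDilation8Nbh3x3FlatSE pixel_array image_width image_height) := by unfold Pre_computeDilation8Nbh3x3FlatSE; infer_instance

def pvWitness_computeDilation8Nbh3x3FlatSE : List (List Int) × Int × Int := ([[1, 0], [0, 0]], 2, 2)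

def Spec_computeDilation8Nbh3x3FlatSE (pixel_array : List (List Int)) (image_width : Int) (image_height : Int) (out : List (List Int)) : Prop := out = computeDilation8Nbh3x3FlatSE_alt pixel_array image_width image_height
instance (pixel_array : List (List Int)) (image_width : Int) (image_height : Int) (out : List (List Int)) : Decidable (Spec_computeDilation8Nbh3x3FlatSE pixel_array image_width image_height out) := by unfold Spec_computeDilation8Nbh3x3FlatSE; infer_instance

-- ===== CLAIM (what is proved, stated in full; the proofs are below) =====
def Claim_equal_computeDilation8Nbh3x3FlatSE : Prop := ∀ (pixel_array : List (List Int)) (image_width : Int) (image_height : Int), Dom_computeDilation8Nbh3x3FlatSE pixel_array image_width image_height → Pre_computeDilation8Nbh3x3FlatSE pixel_array image_width image_height → Spec_computeDilation8Nbh3x3FlatSE pixel_array image_width image_height (computeDilation8Nbh3x3FlatSE pixel_array image_width image_height)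

-- ===== LEMMAS AND PROOFS =====

-- the clipped pixel read both characterizations reduce to
def gclip (pa : List (List Int)) (w h y x : Int) : Int :=
  if y < 0 ∨ x < 0 ∨ y ≥ h ∨ x ≥ w then 0 else pvGet pa y x

-- A's inner 3x3 accumulation, as one named expression
def sumNbh (pa : List (List Int)) (w h y x : Int) : Int :=
  [(-1 : Int), 0, 1].foldl (fun acc i =>
    [(-1 : Int), 0, 1].foldl (fun acc j =>
      if y + i < 0 ∨ x + j < 0 ∨ y + i ≥ h ∨ x + j ≥ w then acc + 0
      else acc + pvGet pa (y + i) (x + j)) acc) 0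

-- B's horizontal-pass cell
def hTerm (pa : List (List Int)) (w y x : Int) : Int :=
  (if x > 0 then pvGet pa y (x - 1) else 0) + pvGet pa y x
  + (if x + 1 < w then pvGet pa y (x + 1) else 0)

lemma addIf (c : Prop) [Decidable c] (a t : Int) :
    (if c then a + 0 else a + t) = a + (if c then 0 else t) := by
  split_ifs <;> ring

lemma sumNbh_eq_gclip (pa : List (List Int)) (w h y x : Int) :
    sumNbh pa w h y x =
      gclip pa w h (y - 1) (x - 1) + gclip pa w h (y - 1) x + gclip pa w h (y - 1) (x + 1)
      + gclip pa w h y (x - 1) + gclip pa w h y x + gclip pa w h y (x + 1)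
      + gclip pa w h (y + 1) (x - 1) + gclip pa w h (y + 1) x + gclip pa w h (y + 1) (x + 1) := by
  simp only [sumNbh, addIf, PySem.List.foldl_add]
  simp only [List.map_cons, List.map_nil, List.sum_cons, List.sum_nil]
  simp only [← sub_eq_add_neg, add_zero, gclip]
  ring

lemma hTerm_eq_gclip (pa : List (List Int)) (w h y x : Int)
    (hy : 0 ≤ y) (hy2 : y < h) (hx : 0 ≤ x) (hx2 : x < w) :
    hTerm pa w y x = gclip pa w h y (x - 1) + gclip pa w h y x + gclip pa w h y (x + 1) := by
  unfold hTerm gclip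
  split_ifs <;> first | rfl | omega

lemma hsLookup (pa : List (List Int)) (w h y x : Int)
    (hy : 0 ≤ y) (hy2 : y < h) (hx : 0 ≤ x) (hx2 : x < w) :
    pvGet ((PySem.List.pyRange 0 h 1).map (fun y' =>
      (PySem.List.pyRange 0 w 1).map (fun x' => hTerm pa w y' x'))) y x = hTerm pa w y x := by
  unfold pvGet
  rw [PySem.List.pyGetD_map_pyRange_of_nonneg _ _ _ _ hy hy2,
      PySem.List.pyGetD_map_pyRange_of_nonneg _ _ _ _ hx hx2]

lemma cell_eq (pa : List (List Int)) (w h y x : Int)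
    (hy : 0 ≤ y) (hy2 : y < h) (hx : 0 ≤ x) (hx2 : x < w) :
    sumNbh pa w h y x =
      (if y > 0 then pvGet ((PySem.List.pyRange 0 h 1).map (fun y' =>
          (PySem.List.pyRange 0 w 1).map (fun x' => hTerm pa w y' x'))) (y - 1) x else 0)
      + pvGet ((PySem.List.pyRange 0 h 1).map (fun y' =>
          (PySem.List.pyRange 0 w 1).map (fun x' => hTerm pa w y' x'))) y x
      + (if y + 1 < h then pvGet ((PySem.List.pyRange 0 h 1).map (fun y' =>
          (PySem.List.pyRange 0 w 1).map (fun x' => hTerm pa w y' x'))) (y + 1) x else 0) := by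
  rw [sumNbh_eq_gclip, hsLookup pa w h y x hy hy2 hx hx2,
      hTerm_eq_gclip pa w h y x hy hy2 hx hx2]
  have htop : (if y > 0 then pvGet ((PySem.List.pyRange 0 h 1).map (fun y' =>
      (PySem.List.pyRange 0 w 1).map (fun x' => hTerm pa w y' x'))) (y - 1) x else 0)
      = gclip pa w h (y - 1) (x - 1) + gclip pa w h (y - 1) x + gclip pa w h (y - 1) (x + 1) := by
    by_cases hc : y > 0
    · rw [if_pos hc, hsLookup pa w h (y - 1) x (by omega) (by omega) hx hx2,
          hTerm_eq_gclip pa w h (y - 1) x (by omega) (by omega) hx hx2]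
    · rw [if_neg hc]
      unfold gclip
      rw [if_pos (by omega), if_pos (by omega), if_pos (by omega)]
      ring
  have hbot : (if y + 1 < h then pvGet ((PySem.List.pyRange 0 h 1).map (fun y' =>
      (PySem.List.pyRange 0 w 1).map (fun x' => hTerm pa w y' x'))) (y + 1) x else 0)
      = gclip pa w h (y + 1) (x - 1) + gclip pa w h (y + 1) x + gclip pa w h (y + 1) (x + 1) := by
    by_cases hc : y + 1 < h
    · rw [if_pos hc, hsLookup pa w h (y + 1) x (by omega) (by omega) hx hx2,
          hTerm_eq_gclip pa w h (y + 1) x (by omega) (by omega) hx hx2]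
    · rw [if_neg hc]
      unfold gclip
      rw [if_pos (by omega), if_pos (by omega), if_pos (by omega)]
      ring
  rw [htop, hbot]
  ring

-- conditional update as an unconditional List.modify
lemma ite_modify {α : Type} (c : Prop) [Decidable c] (l : List α) (i : Nat) (f : α → α) :
    (if c then l.modify i f else l) = l.modify i (fun v => if c then f v else v) := by
  by_cases hc : c
  · simp [hc]
  · simp only [if_neg hc]
    exact (List.modify_id i l).symm

lemma foldl_modify_fixed {α : Type} (i : Nat) (g : Int → α → α) (xs : List Int) (l : List α) :
    xs.foldl (fun l x => l.modify i (g x)) l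
      = l.modify i (fun v => xs.foldl (fun v x => g x v) v) := by
  induction xs generalizing l with
  | nil => exact (List.modify_id i l).symm
  | cons x t ih =>
    simp only [List.foldl_cons, ih, List.modify_modify_eq]
    rfl

lemma modify_append_len {α : Type} (l1 l2 : List α) (f : α → α) :
    (l1 ++ l2).modify l1.length f = l1 ++ l2.modify 0 f := by
  induction l1 with
  | nil => rfl
  | cons a t ih => simp [List.modify_succ_cons, ih]

lemma pyRange_toNat (h : Int) :
    PySem.List.pyRange 0 h 1 = PySem.List.pyRange 0 ((h.toNat : Nat) : Int) 1 := by
  rcases (by omega : 0 ≤ h ∨ h < 0) with hp | hn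
  · rw [Int.toNat_of_nonneg hp]
  · rw [PySem.List.pyRange_one_eq_nil (by omega), PySem.List.pyRange_one_eq_nil (by omega)]

-- each iteration i touches only slot i of a fresh replicate: the fold is a map
lemma foldl_touch {α : Type} (f : Int → α → α) (z : α) (n : Nat) :
    ∀ m : Nat, m ≤ n →
      (PySem.List.pyRange 0 (m : Int) 1).foldl (fun (l : List α) i => l.modify i.toNat (f i)) (List.replicate n z)
        = (PySem.List.pyRange 0 (m : Int) 1).map (fun i => f i z) ++ List.replicate (n - m) z := by
  intro m
  induction m with
  | zero => intro _; simp [PySem.List.pyRange_one_eq_nil]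
  | succ m ih =>
    intro hm
    have hcast : ((m + 1 : Nat) : Int) = ((m : Nat) : Int) + 1 := by push_cast; ring
    rw [hcast, PySem.List.pyRange_one_succ_right (Int.natCast_nonneg m), List.foldl_append,
        List.map_append, ih (by omega)]
    have hlen : ((PySem.List.pyRange 0 ((m : Nat) : Int) 1).map (fun i => f i z)).length = m := by
      simp [PySem.List.length_pyRange_one]
    have hrep : List.replicate (n - m) z = z :: List.replicate (n - (m + 1)) z := by
      have : n - m = (n - (m + 1)) + 1 := by omega
      rw [this, List.replicate_succ]
    have step := modify_append_len ((PySem.List.pyRange 0 ((m : Nat) : Int) 1).map (fun i => f i z))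
      (List.replicate (n - m) z) (f ((m : Nat) : Int))
    rw [hlen] at step
    simp only [List.foldl_cons, List.foldl_nil, Int.toNat_natCast]
    rw [step, hrep, List.modify_zero_cons]
    simp [List.append_assoc]

lemma portA_eq (pa : List (List Int)) (w h : Int) :
    computeDilation8Nbh3x3FlatSE pa w h =
      (PySem.List.pyRange 0 h 1).map (fun y =>
        (PySem.List.pyRange 0 w 1).map (fun x =>
          if sumNbh pa w h y x > 0 then (1 : Int) else 0)) := by
  unfold computeDilation8Nbh3x3FlatSE createInitializedGreyscalePixelArray
  simp only [sumNbh]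
  -- rewrite the conditional writes into unconditional modify form
  simp only [show ∀ (res : List (List Int)) (y x : Int) (c : Prop) (inst : Decidable c),
      (if c then res.modify y.toNat (fun row => row.set x.toNat 1) else res)
        = res.modify y.toNat (fun row => if c then row.set x.toNat 1 else row) from
    fun res y x c inst => ite_modify c res y.toNat _]
  simp only [show ∀ (row : List Int) (x : Int) (c : Prop) (inst : Decidable c),
      (if c then row.set x.toNat 1 else row)
        = row.modify x.toNat (fun v => if c then (1 : Int) else v) from by
    intro row x c inst
    rw [List.set_eq_modify]
    exact ite_modify c row x.toNat _]
  simp only [foldl_modify_fixed]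
  rw [show ((PySem.List.pyRange 0 h 1).map fun _ => (PySem.List.pyRange 0 w 1).map fun _ => (0:Int))
        = List.replicate h.toNat ((PySem.List.pyRange 0 w 1).map fun _ => (0:Int)) from by
      rw [List.map_const']; simp [PySem.List.length_pyRange_one]]
  rw [pyRange_toNat h, foldl_touch _ _ h.toNat h.toNat (le_refl _), Nat.sub_self,
      List.replicate_zero, List.append_nil, ← pyRange_toNat h]
  refine List.map_congr_left (fun y _ => ?_)
  rw [show ((PySem.List.pyRange 0 w 1).map fun _ => (0:Int)) = List.replicate w.toNat (0:Int) from by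
      rw [List.map_const']; simp [PySem.List.length_pyRange_one]]
  rw [pyRange_toNat w, foldl_touch _ _ w.toNat w.toNat (le_refl _), Nat.sub_self,
      List.replicate_zero, List.append_nil, ← pyRange_toNat w]
  rfl

-- ===== VERDICT (by name: the statement is the Claim_ definition above) =====
theorem computeDilation8Nbh3x3FlatSE_spec : Claim_equal_computeDilation8Nbh3x3FlatSE := by
  intro pa w h _ _
  unfold Spec_computeDilation8Nbh3x3FlatSE computeDilation8Nbh3x3FlatSE_alt
  rw [portA_eq]
  refine List.map_congr_left (fun y hy => ?_)
  refine List.map_congr_left (fun x hx => ?_)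
  rw [PySem.List.mem_pyRange_one] at hy hx
  rw [cell_eq pa w h y x hy.1 hy.2 hx.1 hx.2]
  rfl
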